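-- pv_equiv track=rewrite | github.com/Tric76/pythonStuff | secret-lang rolling 6 clean.py | make_rolling
-- ===== SOURCE A (Python) =====
-- rolling_step = 8
--
-- def make_rolling(split_phrase):
--     rolling_message = ""
--     number = ""
--     for i in range(len(split_phrase)):
--         number = split_phrase[i]
--         value = number + (i // rolling_step)
--         rolling_message += str(value)
--     return rolling_message
-- ===== SOURCE B (Python) =====
-- rolling_step = 8
--
-- def make_rolling(split_phrase):
--     pieces = []
--     for chunk_idx, start in enumerate(range(0, len(split_phrase), rolling_step)):
--         for element in split_phrase[start:start + rolling_step]: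
--             pieces.append(str(element + chunk_idx))
--     return "".join(pieces)
-- ===== Notes on version B (the rewrite author's own statement) =====
-- stated objective: alternative
-- what changed: Replaces the single index loop that computes i//8 for every element and grows the string with += by a nested block iteration: an outer loop over 8-element slices carrying an explicit chunk counter, an inner loop over the slice, with the pieces collected in a list and joined once at the end.
import Mathlib
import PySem

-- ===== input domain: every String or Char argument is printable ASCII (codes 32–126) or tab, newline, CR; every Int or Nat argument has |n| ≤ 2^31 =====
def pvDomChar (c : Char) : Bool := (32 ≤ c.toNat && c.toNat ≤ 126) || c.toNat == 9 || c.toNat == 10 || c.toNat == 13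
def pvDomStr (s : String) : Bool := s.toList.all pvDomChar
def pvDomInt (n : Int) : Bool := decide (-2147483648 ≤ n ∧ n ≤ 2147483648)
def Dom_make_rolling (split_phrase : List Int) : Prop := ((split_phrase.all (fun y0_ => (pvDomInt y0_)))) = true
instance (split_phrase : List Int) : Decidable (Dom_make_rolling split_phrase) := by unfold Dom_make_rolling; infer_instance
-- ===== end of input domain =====

-- B iterates in explicit 8-element blocks with a chunk counter and joins collected pieces once,
-- instead of A's single index loop computing i//8 and repeated string +=. Objective: alternative decomposition.

-- ===== PORT A =====
-- for i in range(len(split_phrase)): rolling_message += str(split_phrase[i] + i // 8)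
def make_rolling (split_phrase : List Int) : String :=
  (PySem.List.pyRange 0 (PySem.List.len split_phrase) 1).foldl
    (fun acc i =>
      acc ++ PySem.Int.toStr (PySem.List.pyGetD split_phrase i 0 + PySem.Int.floordiv i 8)) ""

-- ===== PORT B =====
-- outer loop over 8-element slices (recursion on the remaining list, chunk counter carried);
-- inner loop appends str(element + chunk_idx) to the accumulated pieces list.
def make_rolling_altGo (rest : List Int) (chunk_idx : Int) (pieces : List String) : List String :=
  if h : rest = [] then pieces  -- h is used by the termination proof
  else
    make_rolling_altGo (rest.drop 8) (chunk_idx + 1)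
      ((rest.take 8).foldl (fun acc e => acc ++ [PySem.Int.toStr (e + chunk_idx)]) pieces)
termination_by rest.length
decreasing_by
  cases rest with
  | nil => exact absurd rfl h
  | cons a t => simp [List.length_drop]

def make_rolling_alt (split_phrase : List Int) : String :=
  PySem.Str.join "" (make_rolling_altGo split_phrase 0 [])

-- ===== PRECONDITION & SPEC =====
def Spec_make_rolling (split_phrase : List Int) (out : String) : Prop := out = make_rolling_alt split_phrase
instance (split_phrase : List Int) (out : String) : Decidable (Spec_make_rolling split_phrase out) := by unfold Spec_make_rolling; infer_instance

-- ===== CLAIM (what is proved, stated in full; the proofs are below) =====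
def Claim_equal_make_rolling : Prop := ∀ (split_phrase : List Int), Dom_make_rolling split_phrase → Spec_make_rolling split_phrase (make_rolling split_phrase)

-- ===== LEMMAS AND PROOFS =====

theorem pv_join_nil : PySem.Str.join "" [] = "" := by
  simp [PySem.Str.join, PySem.Chars.join, List.intercalate]

theorem pv_flatten_intersperse (l : List (List Char)) :
    (List.intersperse ([] : List Char) l).flatten = l.flatten := by
  induction l with
  | nil => rfl
  | cons a t ih =>
    cases t with
    | nil => rfl
    | cons b u => simp_all [List.intersperse]

theorem pv_join_eq (ps : List String) :
    PySem.Str.join "" ps = String.ofList (ps.map String.toList).flatten := by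
  simp [PySem.Str.join, PySem.Chars.join, List.intercalate, pv_flatten_intersperse]

theorem pv_join_cons (p : String) (ps : List String) :
    PySem.Str.join "" (p :: ps) = p ++ PySem.Str.join "" ps := by
  rw [← String.toList_inj]
  simp [pv_join_eq, String.toList_append]

theorem pv_join_append (a b : List String) :
    PySem.Str.join "" (a ++ b) = PySem.Str.join "" a ++ PySem.Str.join "" b := by
  rw [← String.toList_inj]
  simp [pv_join_eq, String.toList_append]

-- altGo threads its pieces accumulator on the left
theorem pv_altGo_acc (n : Nat) : ∀ (rest : List Int), rest.length ≤ n → ∀ (c : Int) (ps : List String),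
    make_rolling_altGo rest c ps = ps ++ make_rolling_altGo rest c [] := by
  induction n with
  | zero =>
    intro rest h c ps
    have : rest = [] := List.eq_nil_of_length_eq_zero (Nat.le_zero.mp h)
    subst this
    simp [make_rolling_altGo]
  | succ n ih =>
    intro rest h c ps
    by_cases hr : rest = []
    · subst hr; simp [make_rolling_altGo]
    · have hd : (rest.drop 8).length ≤ n := by
        cases rest with
        | nil => exact absurd rfl hr
        | cons a t => simp [List.length_drop] at *; omega
      have e : ∀ qs : List String, make_rolling_altGo rest c qs =
          make_rolling_altGo (rest.drop 8) (c + 1)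
            ((rest.take 8).foldl (fun acc e => acc ++ [PySem.Int.toStr (e + c)]) qs) := by
        intro qs
        conv_lhs => rw [make_rolling_altGo]
        rw [dif_neg hr]
      rw [e ps, e [], ih _ hd, ih _ hd (c + 1)]
      rw [PySem.List.foldl_append_singleton_eq_map, PySem.List.foldl_append_singleton_eq_map]
      simp [List.append_assoc]
      exact (ih _ hd (c + 1) _).symm

theorem pv_altGo_unfold (rest : List Int) (c : Int) (h : rest ≠ []) :
    make_rolling_altGo rest c [] =
      (rest.take 8).map (fun e => PySem.Int.toStr (e + c)) ++ make_rolling_altGo (rest.drop 8) (c + 1) [] := by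
  rw [make_rolling_altGo, dif_neg h, pv_altGo_acc (rest.drop 8).length _ le_rfl,
    PySem.List.foldl_append_singleton_eq_map]
  simp

-- fold of one chunk with a fixed chunk index
theorem pv_chunkFold : ∀ (xs : List Int) (c : Int) (acc : String),
    (List.range xs.length).foldl (fun a k => a ++ PySem.Int.toStr (xs.getD k 0 + c)) acc
      = acc ++ PySem.Str.join "" (xs.map (fun e => PySem.Int.toStr (e + c))) := by
  intro xs
  induction xs with
  | nil => intro c acc; simp [pv_join_nil]
  | cons x t ih =>
    intro c acc
    rw [List.length_cons, List.range_succ_eq_map, List.foldl_cons, List.foldl_map]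
    simp only [List.getD_cons_succ, List.getD_cons_zero]
    rw [ih c (acc ++ PySem.Int.toStr (x + c))]
    rw [List.map_cons, pv_join_cons, ← String.toList_inj]
    simp [String.toList_append]

-- main invariant: A's index fold over l with chunk offset c equals B's block decomposition
theorem pv_main : ∀ (n : Nat) (l : List Int), l.length ≤ n → ∀ (c : Int) (acc : String),
    (List.range l.length).foldl
        (fun a k => a ++ PySem.Int.toStr (l.getD k 0 + (c + ((k / 8 : Nat) : Int)))) acc
      = acc ++ PySem.Str.join "" (make_rolling_altGo l c []) := by
  intro n
  induction n with
  | zero =>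
    intro l h c acc
    have : l = [] := List.eq_nil_of_length_eq_zero (Nat.le_zero.mp h)
    subst this
    simp [make_rolling_altGo, pv_join_nil]
  | succ n ih =>
    intro l h c acc
    by_cases hl : l = []
    · subst hl; simp [make_rolling_altGo, pv_join_nil]
    · set xs := l.take 8 with hxs
      set ys := l.drop 8 with hys
      have hsplit : l = xs ++ ys := (List.take_append_drop 8 l).symm
      have hxlen : xs.length = min 8 l.length := by simp [hxs]
      have hlen : l.length = xs.length + ys.length := by
        simp [hxs, hys]; omega
      rw [hlen, List.range_add, List.foldl_append, List.foldl_map]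
      -- first segment: k < xs.length ≤ 8, so k/8 = 0 and getD hits xs
      have hseg1 : (List.range xs.length).foldl
          (fun a k => a ++ PySem.Int.toStr (l.getD k 0 + (c + ((k / 8 : Nat) : Int)))) acc
          = acc ++ PySem.Str.join "" (xs.map (fun e => PySem.Int.toStr (e + c))) := by
        rw [PySem.List.foldl_congr_mem _ _
          (fun a k => a ++ PySem.Int.toStr (xs.getD k 0 + c)) acc ?_]
        · exact pv_chunkFold xs c acc
        · intro a k hk
          rw [List.mem_range] at hk
          have hk8 : k < 8 := by omega
          have : k / 8 = 0 := Nat.div_eq_of_lt hk8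
          rw [this]
          have hgd : l.getD k 0 = xs.getD k 0 := by
            rw [hsplit]
            simp [List.getD_eq_getElem?_getD, List.getElem?_append_left (by omega : k < xs.length)]
          rw [hgd]
          norm_num
      rw [hseg1]
      by_cases hy : ys = []
      · -- no second block
        rw [hy]
        simp only [List.length_nil, List.range_zero, List.foldl_nil]
        rw [pv_altGo_unfold l c hl, ← hxs, ← hys, hy, pv_join_append]
        simp [make_rolling_altGo, pv_join_nil]
      · -- second segment: index xs.length + j = 8 + j, chunk index becomes c + 1
        have hx8 : xs.length = 8 := by
          have : l.length > 8 := by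
            have := List.length_pos_of_ne_nil hy
            simp [hys] at this; omega
          omega
        have hseg2 : ∀ a : String, (List.range ys.length).foldl
            (fun a j => a ++ PySem.Int.toStr
              (l.getD (xs.length + j) 0 + (c + (((xs.length + j) / 8 : Nat) : Int)))) a
            = a ++ PySem.Str.join "" (make_rolling_altGo ys (c + 1) []) := by
          intro a
          rw [PySem.List.foldl_congr_mem _ _
            (fun a j => a ++ PySem.Int.toStr (ys.getD j 0 + ((c + 1) + ((j / 8 : Nat) : Int)))) a ?_]
          · exact ih ys (by omega) (c + 1) a
          · intro a' j _
            have hgd : l.getD (xs.length + j) 0 = ys.getD j 0 := by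
              rw [hsplit]
              simp [List.getD_eq_getElem?_getD, List.getElem?_append_right (by omega : xs.length ≤ xs.length + j)]
            have hdiv : (xs.length + j) / 8 = 1 + j / 8 := by
              rw [hx8]
              omega
            rw [hgd, hdiv]
            have : (c + ((1 + j / 8 : Nat) : Int)) = (c + 1 + ((j / 8 : Nat) : Int)) := by
              push_cast; ring
            rw [this]
        rw [hseg2]
        rw [pv_altGo_unfold l c hl, ← hxs, ← hys, pv_join_append]
        simp [String.append_assoc]

-- ===== VERDICT (by name: the statement is the Claim_ definition above) =====
theorem make_rolling_spec : Claim_equal_make_rolling := by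
  intro l _
  unfold Spec_make_rolling make_rolling make_rolling_alt
  rw [PySem.List.len_eq, PySem.List.pyRange_zero_nat, List.foldl_map]
  rw [PySem.List.foldl_congr_mem _ _
    (fun a k => a ++ PySem.Int.toStr (l.getD k 0 + ((0 : Int) + ((k / 8 : Nat) : Int)))) "" ?_]
  · rw [pv_main l.length l le_rfl 0 ""]
    simp
  · intro a k _
    rw [PySem.List.pyGetD_of_nonneg l 0 (by positivity)]
    have h8 : PySem.Int.floordiv ((k : Nat) : Int) 8 = ((k / 8 : Nat) : Int) := by
      exact_mod_cast PySem.Int.floordiv_natCast k 8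
    rw [h8]
    simp
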